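-- pv_equiv track=rewrite | github.com/terrene-foundation/kailash-py | src/kailash/workflow/validation.py | _is_defined_before_use
-- ===== SOURCE A (Python) =====
-- def _is_defined_before_use(var_name: str, code: str) -> bool:
--     """Check if variable is defined before use in code."""
--     lines = code.split("\n")
--     defined = False
--
--     for line in lines:
--         line = line.strip()
--         if line.startswith(f"{var_name} =") or line.startswith(f"{var_name}="):
--             defined = True
--         elif var_name in line and not defined:
--             # Used before definition
--             return False
--
--     return True
-- ===== SOURCE B (Python) =====
-- def _is_defined_before_use(var_name: str, code: str) -> bool:
--     """Check if variable is defined before use in code."""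
--     stripped = [ln.strip() for ln in code.split("\n")]
--
--     def is_def(ln):
--         return ln.startswith(var_name + " =") or ln.startswith(var_name + "=")
--
--     def_idx = next((i for i, ln in enumerate(stripped) if is_def(ln)), None)
--     use_idx = next((i for i, ln in enumerate(stripped)
--                     if not is_def(ln) and var_name in ln), None)
--     if use_idx is None:
--         return True
--     if def_idx is None:
--         return False
--     return def_idx < use_idx
-- ===== Notes on version B (the rewrite author's own statement) =====
-- stated objective: alternative
-- what changed: Replaces A's single interleaved scan with a mutable 'defined' flag and early return by two independent find-first passes over the stripped lines (index of first definition line, index of first non-definition line containing the variable), deciding from the two indices.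
import Mathlib
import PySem

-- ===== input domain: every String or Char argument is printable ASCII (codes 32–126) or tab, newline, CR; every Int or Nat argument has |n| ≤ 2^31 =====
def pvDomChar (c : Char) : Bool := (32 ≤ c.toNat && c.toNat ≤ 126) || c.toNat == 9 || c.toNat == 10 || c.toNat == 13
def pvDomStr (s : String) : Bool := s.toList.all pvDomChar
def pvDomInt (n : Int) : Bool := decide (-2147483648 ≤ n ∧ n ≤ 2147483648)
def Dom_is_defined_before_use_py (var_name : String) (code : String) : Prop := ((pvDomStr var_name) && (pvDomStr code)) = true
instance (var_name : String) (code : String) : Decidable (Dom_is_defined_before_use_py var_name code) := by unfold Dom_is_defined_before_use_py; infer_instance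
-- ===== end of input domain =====

-- B replaces A's single scan carrying a running 'defined' flag by two find-first passes
-- (first definition line, first non-definition use line) compared by index (objective: alternative).

-- ===== PORT A =====
-- A's for-loop with early return: recursion over the lines, carrying the 'defined' flag
def goA (v : String) : List String → Bool → Bool
  | [], _ => true
  | l :: rest, defined =>
    if PySem.Str.startswith (PySem.Str.strip l) (v ++ " =")
        || PySem.Str.startswith (PySem.Str.strip l) (v ++ "=") then
      goA v rest true
    else if PySem.Str.isIn v (PySem.Str.strip l) && !defined then
      false
    else
      goA v rest defined

def is_defined_before_use_py (var_name : String) (code : String) : Bool :=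
  goA var_name ((PySem.Str.split? code "\n").getD []) false

-- ===== PORT B =====
def isDefLineB (v : String) (s : String) : Bool :=
  PySem.Str.startswith s (v ++ " =") || PySem.Str.startswith s (v ++ "=")

def is_defined_before_use_py_alt (var_name : String) (code : String) : Bool :=
  let stripped := ((PySem.Str.split? code "\n").getD []).map PySem.Str.strip
  let defIdx := stripped.findIdx? (fun s => isDefLineB var_name s)
  let useIdx := stripped.findIdx? (fun s => !isDefLineB var_name s && PySem.Str.isIn var_name s)
  match useIdx with
  | none => true
  | some u =>
    match defIdx with
    | none => false
    | some d => decide (d < u)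

-- ===== PRECONDITION & SPEC =====
def Spec_is_defined_before_use_py (var_name : String) (code : String) (out : Bool) : Prop := out = is_defined_before_use_py_alt var_name code
instance (var_name : String) (code : String) (out : Bool) : Decidable (Spec_is_defined_before_use_py var_name code out) := by unfold Spec_is_defined_before_use_py; infer_instance

-- ===== CLAIM (what is proved, stated in full; the proofs are below) =====
def Claim_equal_is_defined_before_use_py : Prop := ∀ (var_name : String) (code : String), Dom_is_defined_before_use_py var_name code → Spec_is_defined_before_use_py var_name code (is_defined_before_use_py var_name code)

-- ===== LEMMAS AND PROOFS =====

-- once 'defined' is true, A's loop can only return true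
theorem goA_true (v : String) (ls : List String) : goA v ls true = true := by
  induction ls with
  | nil => rfl
  | cons l rest ih =>
    simp only [goA]
    split
    · exact ih
    · simp only [Bool.not_true, Bool.and_false, Bool.false_eq_true, reduceIte, ih]

-- the main invariant: A's scan from 'defined = false' equals B's index comparison
theorem goA_false_eq (v : String) (ls : List String) :
    goA v ls false =
      (match (ls.map PySem.Str.strip).findIdx?
               (fun s => !isDefLineB v s && PySem.Str.isIn v s) with
       | none => true
       | some u =>
         match (ls.map PySem.Str.strip).findIdx? (fun s => isDefLineB v s) with
         | none => false
         | some d => decide (d < u)) := by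
  induction ls with
  | nil => rfl
  | cons l rest ih =>
    simp only [goA, List.map_cons, List.findIdx?_cons]
    by_cases hdef : isDefLineB v (PySem.Str.strip l) = true
    · have hd : (PySem.Str.startswith (PySem.Str.strip l) (v ++ " =")
          || PySem.Str.startswith (PySem.Str.strip l) (v ++ "=")) = true := hdef
      simp only [hd, hdef, Bool.not_true, Bool.false_and, reduceIte, goA_true]
      cases hU : (rest.map PySem.Str.strip).findIdx?
          (fun s => !isDefLineB v s && PySem.Str.isIn v s) with
      | none => rfl
      | some u => simp [Nat.zero_lt_succ]
    · rw [Bool.not_eq_true] at hdef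
      have hd : (PySem.Str.startswith (PySem.Str.strip l) (v ++ " =")
          || PySem.Str.startswith (PySem.Str.strip l) (v ++ "=")) = false := hdef
      by_cases huse : PySem.Str.isIn v (PySem.Str.strip l) = true
      · simp only [hd, hdef, huse, Bool.not_false, Bool.and_true,
          Bool.false_eq_true, reduceIte]
        cases hD : (rest.map PySem.Str.strip).findIdx? (fun s => isDefLineB v s) with
        | none => rfl
        | some d => simp
      · rw [Bool.not_eq_true] at huse
        simp only [hd, hdef, huse, Bool.and_false, Bool.false_eq_true, reduceIte]
        rw [ih]
        cases hU : (rest.map PySem.Str.strip).findIdx?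
            (fun s => !isDefLineB v s && PySem.Str.isIn v s) with
        | none => rfl
        | some u =>
          simp only [Option.map_some]
          cases hD : (rest.map PySem.Str.strip).findIdx? (fun s => isDefLineB v s) with
          | none => rfl
          | some d => simp only [Option.map_some, Bool.false_and, Bool.false_eq_true, reduceIte,
              Nat.add_lt_add_iff_right]

-- ===== VERDICT (by name: the statement is the Claim_ definition above) =====
theorem is_defined_before_use_py_spec : Claim_equal_is_defined_before_use_py := by
  intro v code _
  show is_defined_before_use_py v code = is_defined_before_use_py_alt v code
  unfold is_defined_before_use_py is_defined_before_use_py_alt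
  exact goA_false_eq v ((PySem.Str.split? code "\n").getD [])
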